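-- pv_equiv track=rewrite | github.com/alon21034/japanese-grammer | src/jp_daily_line_bot/nhk_lesson.py | choose_next_news
-- ===== SOURCE A (Python) =====
-- from typing import Any
--
-- def choose_next_news(index_items: list[dict[str, Any]], sent_news_ids: list[str]) -> str:
--     seen = {str(news_id) for news_id in sent_news_ids if news_id}
--     for item in index_items:
--         news_id = str(item.get("news_id", "")).strip()
--         if news_id and news_id not in seen:
--             return news_id
--     for item in index_items:
--         news_id = str(item.get("news_id", "")).strip()
--         if news_id:
--             return news_id
--     raise RuntimeError("No NHK Easy news_id found in index.")
-- ===== SOURCE B (Python) =====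
-- def choose_next_news(index_items, sent_news_ids):
--     # single pass with a maintained fallback instead of A's two sequential scans
--     seen = {str(news_id) for news_id in sent_news_ids if news_id}
--     first_valid = None
--     for item in index_items:
--         news_id = str(item.get("news_id", "")).strip()
--         if news_id:
--             if news_id not in seen:
--                 return news_id
--             if first_valid is None:
--                 first_valid = news_id
--     if first_valid is not None:
--         return first_valid
--     raise RuntimeError("No NHK Easy news_id found in index.")
-- ===== Notes on version B (the rewrite author's own statement) =====
-- stated objective: simpler
-- what changed: A makes two sequential passes over index_items (first for an unsent id, then again for any valid id); B makes one pass maintaining a first_valid fallback, returning immediately on an unsent id.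
-- outside the precondition, e.g. on choose_next_news([], []): A raises RuntimeError, B raises RuntimeError
import Mathlib
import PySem

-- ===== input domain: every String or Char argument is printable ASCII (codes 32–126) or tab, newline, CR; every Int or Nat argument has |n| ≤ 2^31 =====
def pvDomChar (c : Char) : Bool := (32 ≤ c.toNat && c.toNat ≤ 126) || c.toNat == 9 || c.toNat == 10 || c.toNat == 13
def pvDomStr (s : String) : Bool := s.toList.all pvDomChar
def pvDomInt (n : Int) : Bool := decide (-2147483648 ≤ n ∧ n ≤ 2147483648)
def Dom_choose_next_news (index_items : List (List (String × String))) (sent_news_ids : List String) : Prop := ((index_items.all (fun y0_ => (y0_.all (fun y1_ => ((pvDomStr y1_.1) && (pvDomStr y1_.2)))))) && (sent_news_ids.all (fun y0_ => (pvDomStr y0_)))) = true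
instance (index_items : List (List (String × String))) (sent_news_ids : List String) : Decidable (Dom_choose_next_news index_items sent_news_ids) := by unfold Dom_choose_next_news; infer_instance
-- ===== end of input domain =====

-- ===== PORT A =====
-- B collapses A's two sequential passes into one pass with a fallback accumulator (simpler, same cost).
-- Equivalence is about the return value only; where Python A raises RuntimeError (no valid news_id), Pre_ excludes the input.
def pvNid (item : List (String × String)) : String :=
  PySem.Str.strip (PySem.Dict.getD (PySem.Dict.mk item) "news_id" "")

def pvLoop1 (seen : PySem.Set String) : List (List (String × String)) → Option String
  | [] => none
  | item :: rest =>
    let nid := pvNid item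
    if nid ≠ "" ∧ ¬ PySem.Set.contains seen nid then some nid else pvLoop1 seen rest

def pvLoop2 : List (List (String × String)) → Option String
  | [] => none
  | item :: rest =>
    let nid := pvNid item
    if nid ≠ "" then some nid else pvLoop2 rest

def choose_next_news (index_items : List (List (String × String))) (sent_news_ids : List String) : String :=
  let seen := PySem.Set.ofList (sent_news_ids.filter (fun s => s ≠ ""))
  match pvLoop1 seen index_items with
  | some s => s
  | none => (pvLoop2 index_items).getD ""   -- "" stands for the RuntimeError path, excluded by Pre_

-- ===== PORT B =====
def pvNidB (item : List (String × String)) : String :=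
  PySem.Str.strip (PySem.Dict.getD (PySem.Dict.mk item) "news_id" "")

def pvAltLoop (seen : PySem.Set String) : List (List (String × String)) → Option String → String
  | [], fb => fb.getD ""   -- "" stands for the RuntimeError path, excluded by Pre_
  | item :: rest, fb =>
    let nid := pvNidB item
    if nid ≠ "" then
      if ¬ PySem.Set.contains seen nid then nid
      else pvAltLoop seen rest (if fb.isNone then some nid else fb)
    else pvAltLoop seen rest fb

def choose_next_news_alt (index_items : List (List (String × String))) (sent_news_ids : List String) : String :=
  let seen := PySem.Set.ofList (sent_news_ids.filter (fun s => s ≠ ""))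
  pvAltLoop seen index_items none

-- ===== PRECONDITION & SPEC =====
-- Python A (and B) raise RuntimeError when no item yields a nonempty stripped news_id; Pre_ excludes exactly those inputs.
def Pre_choose_next_news (index_items : List (List (String × String))) (sent_news_ids : List String) : Prop :=
  (index_items.any (fun item => pvNid item ≠ "")) = true
instance (index_items : List (List (String × String))) (sent_news_ids : List String) : Decidable (Pre_choose_next_news index_items sent_news_ids) := by unfold Pre_choose_next_news; infer_instance
def pvWitness_choose_next_news : (List (List (String × String))) × List String := ([[("news_id", "a")]], [])

def Spec_choose_next_news (index_items : List (List (String × String))) (sent_news_ids : List String) (out : String) : Prop := out = choose_next_news_alt index_items sent_news_ids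
instance (index_items : List (List (String × String))) (sent_news_ids : List String) (out : String) : Decidable (Spec_choose_next_news index_items sent_news_ids out) := by unfold Spec_choose_next_news; infer_instance

-- ===== CLAIM (what is proved, stated in full; the proofs are below) =====
def Claim_equal_choose_next_news : Prop := ∀ (index_items : List (List (String × String))) (sent_news_ids : List String), Dom_choose_next_news index_items sent_news_ids → Pre_choose_next_news index_items sent_news_ids → Spec_choose_next_news index_items sent_news_ids (choose_next_news index_items sent_news_ids)

-- ===== LEMMAS AND PROOFS =====
theorem pvNidB_eq (item : List (String × String)) : pvNidB item = pvNid item := rfl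

-- The one-pass loop with fallback fb equals: first unsent id, else (fb, else first valid id), else "".
theorem pvAltLoop_eq (seen : PySem.Set String) (items : List (List (String × String))) (fb : Option String) :
    pvAltLoop seen items fb =
      (pvLoop1 seen items).getD ((fb.orElse (fun _ => pvLoop2 items)).getD "") := by
  induction items generalizing fb with
  | nil => cases fb <;> simp [pvAltLoop, pvLoop1, pvLoop2]
  | cons item rest ih =>
    simp only [pvAltLoop, pvLoop1, pvLoop2, pvNidB_eq]
    by_cases h1 : pvNid item ≠ ""
    · by_cases h2 : pvNid item ∈ seen
      · cases fb <;> simp [h1, h2, ih]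
      · simp [h1, h2]
    · simp [h1, ih]

theorem choose_next_news_spec : Claim_equal_choose_next_news := by
  intro index_items sent_news_ids _ _
  simp only [Spec_choose_next_news, choose_next_news, choose_next_news_alt, pvAltLoop_eq]
  rcases h : pvLoop1 _ index_items with _ | v <;> simp [h]
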